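-- pv_equiv track=rewrite | github.com/RyanProMax/stock-analysis-api | src/services/research_snapshot_service.py | _merge_item_statuses
-- ===== SOURCE A (Python) =====
-- from typing import Any, Dict, Mapping, Optional, Sequence
--
-- def _merge_item_statuses(items: Sequence[Dict[str, Any]]) -> str:
--     if not items:
--         return "ok"
--     statuses = {str(item.get("status") or "") for item in items}
--     if statuses == {"not_implemented"}:
--         return "not_implemented"
--     if statuses == {"ok"}:
--         return "ok"
--     return "partial"
-- ===== SOURCE B (Python) =====
-- def _classify(s):
--     return s if s in ("ok", "not_implemented") else "partial"
--
--
-- def _merge(m, cur):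
--     if m is None:
--         return cur
--     return m if m == cur else "partial"
--
--
-- def _merge_item_statuses(items):
--     merged = None
--     for item in items:
--         merged = _merge(merged, _classify(str(item.get("status") or "")))
--     return "ok" if merged is None else merged
-- ===== Notes on version B (the rewrite author's own statement) =====
-- stated objective: alternative
-- what changed: Replaces building a set of normalized statuses and comparing it to singleton sets by a single left fold over a three-valued merge semilattice: each status is classified as ok/not_implemented/partial and adjacent classifications are merged pairwise ('partial' absorbing), with no intermediate collection.
import Mathlib
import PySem

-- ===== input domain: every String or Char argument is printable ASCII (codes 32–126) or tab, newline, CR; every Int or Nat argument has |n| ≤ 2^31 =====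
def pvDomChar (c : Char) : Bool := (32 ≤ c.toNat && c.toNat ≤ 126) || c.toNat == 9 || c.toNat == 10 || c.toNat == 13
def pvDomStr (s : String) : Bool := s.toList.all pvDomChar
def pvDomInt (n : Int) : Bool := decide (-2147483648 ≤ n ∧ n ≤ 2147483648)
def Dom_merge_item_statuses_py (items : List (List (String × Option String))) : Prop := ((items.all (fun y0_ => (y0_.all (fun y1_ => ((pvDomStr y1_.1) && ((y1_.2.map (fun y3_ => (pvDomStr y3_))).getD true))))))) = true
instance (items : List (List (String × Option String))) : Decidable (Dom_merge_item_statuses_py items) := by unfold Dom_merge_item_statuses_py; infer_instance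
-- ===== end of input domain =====

-- B replaces A's "collect a set of normalized statuses, compare with singleton sets" by a
-- single left fold over a three-valued merge semilattice (objective: alternative, same cost).

-- str(item.get("status") or "") — shared normalization both Pythons perform per item
def pvStatus (item : List (String × Option String)) : String :=
  match item.find? (fun p => p.1 == "status") with  -- assoc-list lookup = first match
  | some (_, some s) => if s = "" then "" else s
  | _ => ""

-- ===== PORT A =====
def merge_item_statuses_py (items : List (List (String × Option String))) : String :=
  if items = [] then "ok"
  else
    let statuses : PySem.Set String := PySem.Set.ofList (items.map pvStatus)
    if PySem.Set.equal statuses ["not_implemented"] then "not_implemented"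
    else if PySem.Set.equal statuses ["ok"] then "ok"
    else "partial"

-- ===== PORT B =====
-- _classify from Source B
def pvClassify (s : String) : String :=
  if s = "ok" || s = "not_implemented" then s else "partial"

-- _merge from Source B
def pvMerge (m : Option String) (cur : String) : String :=
  match m with
  | none => cur
  | some m => if m = cur then m else "partial"

def merge_item_statuses_py_alt (items : List (List (String × Option String))) : String :=
  let merged := items.foldl (fun merged item => some (pvMerge merged (pvClassify (pvStatus item)))) (none : Option String)
  merged.getD "ok"

-- ===== PRECONDITION & SPEC =====
def Spec_merge_item_statuses_py (items : List (List (String × Option String))) (out : String) : Prop := out = merge_item_statuses_py_alt items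
instance (items : List (List (String × Option String))) (out : String) : Decidable (Spec_merge_item_statuses_py items out) := by unfold Spec_merge_item_statuses_py; infer_instance

-- ===== CLAIM (what is proved, stated in full; the proofs are below) =====
def Claim_equal_merge_item_statuses_py : Prop := ∀ (items : List (List (String × Option String))), Dom_merge_item_statuses_py items → Spec_merge_item_statuses_py items (merge_item_statuses_py items)

-- ===== LEMMAS AND PROOFS =====

-- a nonempty list maps to the singleton set {x} iff every element equals x
theorem pv_set_eq_singleton (l : List String) (x : String) (h : l ≠ []) :
    PySem.Set.equal (PySem.Set.ofList l) [x] = l.all (· == x) := by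
  rcases l with _ | ⟨a, t⟩
  · exact absurd rfl h
  · rw [Bool.eq_iff_iff]
    simp only [PySem.Set.equal_iff, PySem.Set.mem_ofList, List.mem_singleton,
      List.all_cons, List.all_eq_true, Bool.and_eq_true, beq_iff_eq]
    constructor
    · intro hiff
      have ha : a = x := (hiff a).mp (List.mem_cons_self ..)
      exact ⟨ha, fun y hy => (hiff y).mp (List.mem_cons_of_mem a hy)⟩
    · rintro ⟨ha, ht⟩ y
      constructor
      · intro hy
        rcases List.mem_cons.mp hy with h1 | h2
        · exact h1.trans ha
        · exact ht y h2
      · intro hy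
        subst hy
        exact ha ▸ List.mem_cons_self ..

-- characterization of B's fold once the accumulator is seeded
theorem pv_fold_char (l : List (List (String × Option String))) (m : String) :
    l.foldl (fun merged item => some (pvMerge merged (pvClassify (pvStatus item)))) (some m)
      = some (if l.all (fun it => pvClassify (pvStatus it) == m) then m else "partial") := by
  induction l generalizing m with
  | nil => simp
  | cons x t ih =>
    by_cases hx : m = pvClassify (pvStatus x)
    · have hm : pvMerge (some m) (pvClassify (pvStatus x)) = m := by simp [pvMerge, hx]
      rw [List.foldl_cons, hm, ih]
      simp [List.all_cons, ← hx]
    · have hm : pvMerge (some m) (pvClassify (pvStatus x)) = "partial" := by simp [pvMerge, hx]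
      rw [List.foldl_cons, hm, ih]
      have hne : (pvClassify (pvStatus x) == m) = false := by
        simp only [beq_eq_false_iff_ne]; exact fun h => hx h.symm
      simp [List.all_cons, hne]

-- pvClassify hits "ok" / "not_implemented" exactly where the raw status is that value
theorem pv_classify_ok (s : String) : (pvClassify s == "ok") = (s == "ok") := by
  unfold pvClassify; split_ifs with h <;> simp_all
theorem pv_classify_ni (s : String) : (pvClassify s == "not_implemented") = (s == "not_implemented") := by
  unfold pvClassify
  split_ifs with h
  · rfl
  · simp only [Bool.or_eq_true, decide_eq_true_eq, not_or] at h
    simp [beq_eq_false_iff_ne, Ne, h.2]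

-- ===== VERDICT (by name: the statement is the Claim_ definition above) =====
theorem merge_item_statuses_py_spec : Claim_equal_merge_item_statuses_py := by
  intro items _
  unfold Spec_merge_item_statuses_py merge_item_statuses_py merge_item_statuses_py_alt
  rcases items with _ | ⟨x, t⟩
  · rfl
  · dsimp only
    rw [pv_set_eq_singleton _ _ (by simp), pv_set_eq_singleton _ _ (by simp)]
    rw [List.foldl_cons,
      show some (pvMerge none (pvClassify (pvStatus x))) = some (pvClassify (pvStatus x)) from rfl,
      pv_fold_char, Option.getD_some]
    simp only [List.all_map, List.all_cons, Function.comp]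
    by_cases hok : pvStatus x = "ok"
    · have hc : pvClassify (pvStatus x) = "ok" := by simp [pvClassify, hok]
      rw [hc]
      simp only [pv_classify_ok, hok]
      by_cases ht : t.all (fun it => pvStatus it == "ok") = true
      · simp [ht]
        exact fun y hy => by simpa using List.all_eq_true.mp ht y hy
      · simp only [Bool.not_eq_true] at ht
        simp [ht]
        obtain ⟨y, hy, hny⟩ := List.all_eq_false.mp ht
        exact ⟨y, hy, by simpa using hny⟩
    · by_cases hni : pvStatus x = "not_implemented"
      · have hc : pvClassify (pvStatus x) = "not_implemented" := by simp [pvClassify, hni]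
        rw [hc]
        simp only [pv_classify_ni, hni]
        by_cases ht : t.all (fun it => pvStatus it == "not_implemented") = true
        · simp [ht]
          exact fun y hy => by simpa using List.all_eq_true.mp ht y hy
        · simp only [Bool.not_eq_true] at ht
          simp [ht]
          obtain ⟨y, hy, hny⟩ := List.all_eq_false.mp ht
          exact ⟨y, hy, by simpa using hny⟩
      · have hc : pvClassify (pvStatus x) = "partial" := by simp [pvClassify, hok, hni]
        rw [hc]
        have h1 : (pvStatus x == "not_implemented") = false := by simp [beq_eq_false_iff_ne, hni]
        have h2 : (pvStatus x == "ok") = false := by simp [beq_eq_false_iff_ne, hok]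
        simp [h1, h2]
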